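-- pv_equiv track=rewrite | github.com/ANewHusky/CSE-415-course-work | a1-starter-code/a1-starter-code/a1_exercises.py | double_vowels
-- ===== SOURCE A (Python) =====
-- def double_vowels(text):
--     """Return a new version of text, with all the vowels doubled.
--     For example:  "The *BIG BAD* wolf!" => "Theee "BIIG BAAD* woolf!".
--     For this exercise assume the vowels are
--     the characters A,E,I,O, and U (and a,e,i,o, and u).
--     Maintain the case of the characters."""
--     vowels = {'a', 'e', 'i', 'o', 'u', 'A', 'E', 'I', 'O', 'U'}
--     toReturn = []
--     for char in text:
--         if char in vowels:
--             toReturn.append(char * 2)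
--         else:
--             toReturn.append(char)
--     return ''.join(toReturn)
-- ===== SOURCE B (Python) =====
-- def double_vowels(text):
--     """Return a new version of text, with all the vowels doubled.
--     Walks a mutable copy of the text right-to-left and splices a duplicate
--     in place at each vowel position (back-to-front so earlier indices stay valid)."""
--     chars = list(text)
--     for i in range(len(chars) - 1, -1, -1):
--         if chars[i] in "aeiouAEIOU":
--             chars.insert(i, chars[i])
--     return ''.join(chars)
-- ===== Notes on version B (the rewrite author's own statement) =====
-- stated objective: alternative
-- what changed: Instead of A's left-to-right pass appending a chunk per character, B mutates a list copy of the text in place, iterating indices right-to-left and splicing a duplicate at each vowel position with list.insert.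
import Mathlib
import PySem

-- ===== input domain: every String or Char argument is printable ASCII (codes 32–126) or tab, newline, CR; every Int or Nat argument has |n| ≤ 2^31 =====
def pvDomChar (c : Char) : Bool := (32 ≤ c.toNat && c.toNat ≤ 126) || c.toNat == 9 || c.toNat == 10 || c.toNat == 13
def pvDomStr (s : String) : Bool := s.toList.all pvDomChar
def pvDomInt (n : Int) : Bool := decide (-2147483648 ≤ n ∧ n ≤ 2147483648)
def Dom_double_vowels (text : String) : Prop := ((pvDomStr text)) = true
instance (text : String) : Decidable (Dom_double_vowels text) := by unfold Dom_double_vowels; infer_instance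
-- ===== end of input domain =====

-- B replaces A's left-to-right chunk-append pass by in-place splicing: it walks a
-- mutable copy of the text right-to-left and inserts a duplicate at each vowel
-- position (alternative decomposition; return values proved equal).

-- ===== PORT A =====
def double_vowels (text : String) : String :=
  let vowels : PySem.Set Char := PySem.Set.ofList ['a','e','i','o','u','A','E','I','O','U']
  let toReturn : List (List Char) :=
    text.toList.foldl (fun acc c =>
      if PySem.Set.contains vowels c then acc ++ [[c, c]] else acc ++ [[c]]) []
  String.mk (PySem.Chars.join [] toReturn)

-- ===== PORT B =====
-- chars = list(text); for i in range(len(chars)-1, -1, -1): if chars[i] in "aeiouAEIOU": chars.insert(i, chars[i]); return ''.join(chars)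
def double_vowels_alt (text : String) : String :=
  let chars0 : List Char := text.toList
  let chars :=
    (PySem.List.pyRange ((chars0.length : Int) - 1) (-1) (-1)).foldl
      (fun chars i =>
        match PySem.List.pyGet? chars i with
        | some c => if ("aeiouAEIOU".toList.contains c) then PySem.List.insert chars i c else chars
        | none => chars)   -- unreachable: every i of the range is in bounds (Python raises only out of range)
      chars0
  String.mk chars          -- ''.join of the 1-char strings is the list itself

-- ===== PRECONDITION & SPEC =====
def Spec_double_vowels (text : String) (out : String) : Prop := out = double_vowels_alt text
instance (text : String) (out : String) : Decidable (Spec_double_vowels text out) := by unfold Spec_double_vowels; infer_instance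

-- ===== CLAIM (what is proved, stated in full; the proofs are below) =====
def Claim_equal_double_vowels : Prop := ∀ (text : String), Dom_double_vowels text → Spec_double_vowels text (double_vowels text)

-- ===== LEMMAS AND PROOFS =====

-- the doubled form of a list of characters (the common value both ports compute)
def dvE (l : List Char) : List Char :=
  l.flatMap (fun c => if "aeiouAEIOU".toList.contains c then [c, c] else [c])

-- ''.join on an empty separator is concatenation
lemma join_nil_flatten (parts : List (List Char)) : PySem.Chars.join [] parts = parts.flatten := by
  induction parts with
  | nil => rfl
  | cons p ps ih =>
      cases ps with
      | nil => simp [PySem.Chars.join, List.intercalate]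
      | cons q qs =>
          simp only [PySem.Chars.join, List.intercalate, List.intersperse] at ih ⊢
          simp_all [List.flatten]

-- A's set-membership test is plain membership in the vowel list
lemma dv_vowel_test (c : Char) :
    PySem.Set.contains (PySem.Set.ofList ['a','e','i','o','u','A','E','I','O','U']) c
      = "aeiouAEIOU".toList.contains c := by
  have h : PySem.Set.ofList ['a','e','i','o','u','A','E','I','O','U']
      = ['a','e','i','o','u','A','E','I','O','U'] := by decide
  rw [h]
  rfl

-- A's foldl emits one chunk per character, left to right
lemma dv_foldl_A (l : List Char) (acc : List (List Char)) :
    l.foldl (fun acc c =>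
      if PySem.Set.contains (PySem.Set.ofList ['a','e','i','o','u','A','E','I','O','U']) c
        then acc ++ [[c, c]] else acc ++ [[c]]) acc
      = acc ++ l.map (fun c => if "aeiouAEIOU".toList.contains c then [c, c] else [c]) := by
  induction l generalizing acc with
  | nil => simp
  | cons c l ih =>
      simp only [List.foldl_cons, List.map_cons, dv_vowel_test] at ih ⊢
      rw [show (if "aeiouAEIOU".toList.contains c then acc ++ [[c, c]] else acc ++ [[c]])
          = acc ++ [if "aeiouAEIOU".toList.contains c then [c, c] else [c]] from by split <;> rfl]
      rw [ih]; simp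

-- invariant of B's right-to-left loop: with the suffix already expanded, running the
-- remaining indices |p|-1 .. 0 expands the prefix p as well
lemma dv_foldl_B (p q : List Char) :
    (PySem.List.pyRange ((p.length : Int) - 1) (-1) (-1)).foldl
      (fun chars i =>
        match PySem.List.pyGet? chars i with
        | some c => if ("aeiouAEIOU".toList.contains c) then PySem.List.insert chars i c else chars
        | none => chars)
      (p ++ dvE q) = dvE (p ++ q) := by
  induction p using List.reverseRecOn generalizing q with
  | nil =>
      rw [PySem.List.pyRange_neg_one_eq_nil (by norm_num)]
      simp
  | append_singleton p' c ih =>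
      have hlen : (((p' ++ [c]).length : Int) - 1) = (p'.length : Int) := by
        simp
      rw [hlen, PySem.List.pyRange_neg_one_cons (by omega), List.foldl_cons]
      have hget : PySem.List.pyGet? (p' ++ [c] ++ dvE q) (p'.length : Int) = some c := by
        rw [List.append_assoc, List.singleton_append]
        exact PySem.List.pyGet?_append_length p' (dvE q) c
      have ht : (p' ++ [c] ++ dvE q).take p'.length = p' := by
        rw [List.append_assoc]; exact List.take_left
      have hd : (p' ++ [c] ++ dvE q).drop p'.length = c :: dvE q := by
        rw [List.append_assoc]; exact List.drop_left
      have hstate : ∀ _ : "aeiouAEIOU".toList.contains c = true,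
          PySem.List.insert (p' ++ [c] ++ dvE q) (p'.length : Int) c
            = p' ++ dvE (c :: q) := by
        intro h
        rw [PySem.List.insert_natCast _ _ _ (by simp)]
        rw [ht, hd]
        simp only [dvE, List.flatMap_cons]
        rw [if_pos h]
        rfl
      simp only [hget]
      by_cases h : "aeiouAEIOU".toList.contains c = true
      · rw [if_pos h, hstate h, ih (c :: q)]
        rw [List.append_assoc]
        rfl
      · rw [if_neg h]
        have heq : p' ++ [c] ++ dvE q = p' ++ dvE (c :: q) := by
          rw [List.append_assoc]
          simp only [dvE, List.flatMap_cons]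
          rw [if_neg h]
        rw [heq, ih (c :: q)]
        rw [List.append_assoc]
        rfl

-- ===== VERDICT (by name: the statement is the Claim_ definition above) =====
theorem double_vowels_spec : Claim_equal_double_vowels := by
  intro text _
  show double_vowels text = double_vowels_alt text
  have hA : double_vowels text = String.mk (dvE text.toList) := by
    show String.mk (PySem.Chars.join [] (text.toList.foldl _ [])) = _
    rw [dv_foldl_A, join_nil_flatten]
    simp [dvE, List.flatMap]
  have hB : double_vowels_alt text = String.mk (dvE text.toList) := by
    have h2 := dv_foldl_B text.toList []
    have h0 : dvE [] = ([] : List Char) := rfl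
    rw [h0, List.append_nil] at h2
    exact congrArg String.mk h2
  rw [hA, hB]
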